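-- pv_equiv track=rewrite | github.com/cjin1510/Hw4 | cacti.py | cacti_number
-- ===== SOURCE A (Python) =====
-- def cacti_number(plot):
--     count = 0
--     rows, cols = len(plot), len(plot[0])
--     for i in range(rows):
--         for j in range(cols):
--             if plot[i][j] == 0:
--                 adjacent = False
--                 # Check for adjacent cacti horizontally and vertically
--                 if i > 0 and plot[i-1][j] == 1:
--                     adjacent = True
--                 elif i < rows-1 and plot[i+1][j] == 1:
--                     adjacent = True
--                 elif j > 0 and plot[i][j-1] == 1:
--                     adjacent = True
--                 elif j < cols-1 and plot[i][j+1] == 1: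
--                     adjacent = True
--                 # Check for adjacent cacti diagonally
--                 elif i > 0 and j > 0 and plot[i-1][j-1] == 1:
--                     adjacent = True
--                 elif i > 0 and j < cols-1 and plot[i-1][j+1] == 1:
--                     adjacent = True
--                 elif i < rows-1 and j > 0 and plot[i+1][j-1] == 1:
--                     adjacent = True
--                 elif i < rows-1 and j < cols-1 and plot[i+1][j+1] == 1:
--                     adjacent = True
--                 if not adjacent:
--                     count += 1
--     return count
-- ===== SOURCE B (Python) =====
-- def cacti_number(plot):
--     rows, cols = len(plot), len(plot[0])
--
--     def neighbors(i, j):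
--         out = []
--         for di in (-1, 0, 1):
--             for dj in (-1, 0, 1):
--                 ni, nj = i + di, j + dj
--                 if 0 <= ni < rows and 0 <= nj < cols:
--                     out.append((ni, nj))
--         return out
--
--     near = set()
--     for i in range(rows):
--         for j in range(cols):
--             if plot[i][j] == 1:
--                 near.update(neighbors(i, j))
--     count = 0
--     for i in range(rows):
--         for j in range(cols):
--             if plot[i][j] == 0 and (i, j) not in near:
--                 count += 1
--     return count
-- ===== Notes on version B (the rewrite author's own statement) =====
-- stated objective: alternative
-- what changed: B replaces A's per-zero-cell 8-branch elif neighbor probing by first materializing a set of all in-bounds cells adjacent to any cactus in one pass and then counting zero cells not in that set.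
import Mathlib
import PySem

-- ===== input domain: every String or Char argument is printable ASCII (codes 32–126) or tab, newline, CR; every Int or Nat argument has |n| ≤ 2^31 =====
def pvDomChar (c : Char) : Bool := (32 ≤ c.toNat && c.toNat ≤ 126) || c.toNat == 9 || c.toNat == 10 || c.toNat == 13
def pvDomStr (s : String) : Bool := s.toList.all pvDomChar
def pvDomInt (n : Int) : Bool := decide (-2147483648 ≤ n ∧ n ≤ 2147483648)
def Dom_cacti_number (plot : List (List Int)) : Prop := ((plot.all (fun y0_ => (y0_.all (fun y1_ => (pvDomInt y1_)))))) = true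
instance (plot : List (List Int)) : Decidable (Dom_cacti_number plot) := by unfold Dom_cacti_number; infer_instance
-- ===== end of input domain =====

-- B builds the set of all cells adjacent (8-neighbor, in bounds) to any cactus first,
-- then counts zero cells outside that set; A probes the 8 neighbors of each zero cell
-- with an elif chain. Same value, different decomposition.

-- plot[i][j]; both Pythons index only in-range under Pre_, so the default is never read there
def pvCell (plot : List (List Int)) (i j : Int) : Int :=
  PySem.List.pyGetD (PySem.List.pyGetD plot i []) j 0

-- ===== PORT A =====
-- A's elif chain computing 'adjacent'
def pvAdjA (plot : List (List Int)) (rows cols i j : Int) : Bool :=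
  if i > 0 && pvCell plot (i-1) j == 1 then true
  else if i < rows-1 && pvCell plot (i+1) j == 1 then true
  else if j > 0 && pvCell plot i (j-1) == 1 then true
  else if j < cols-1 && pvCell plot i (j+1) == 1 then true
  else if i > 0 && j > 0 && pvCell plot (i-1) (j-1) == 1 then true
  else if i > 0 && j < cols-1 && pvCell plot (i-1) (j+1) == 1 then true
  else if i < rows-1 && j > 0 && pvCell plot (i+1) (j-1) == 1 then true
  else if i < rows-1 && j < cols-1 && pvCell plot (i+1) (j+1) == 1 then true
  else false

def cacti_number (plot : List (List Int)) : Int :=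
  let rows : Int := plot.length
  let cols : Int := (PySem.List.pyGetD plot 0 []).length
  (PySem.List.pyRange 0 rows 1).foldl (fun count i =>
    (PySem.List.pyRange 0 cols 1).foldl (fun count j =>
      if pvCell plot i j == 0 then
        (if !(pvAdjA plot rows cols i j) then count + 1 else count)
      else count) count) 0

-- ===== PORT B =====
-- in-bounds 8-neighborhood (incl. the cell itself), in Source B's loop order
def pvNbrs (rows cols i j : Int) : List (Int × Int) :=
  ([-1, 0, 1] : List Int).foldl (fun out di =>
    ([-1, 0, 1] : List Int).foldl (fun out dj =>
      if 0 ≤ i + di && i + di < rows && 0 ≤ j + dj && j + dj < cols then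
        out ++ [(i + di, j + dj)]
      else out) out) []

def pvNear (plot : List (List Int)) (rows cols : Int) : PySem.Set (Int × Int) :=
  (PySem.List.pyRange 0 rows 1).foldl (fun near i =>
    (PySem.List.pyRange 0 cols 1).foldl (fun near j =>
      if pvCell plot i j == 1 then PySem.Set.update near (pvNbrs rows cols i j)
      else near) near) PySem.Set.empty

def cacti_number_alt (plot : List (List Int)) : Int :=
  let rows : Int := plot.length
  let cols : Int := (PySem.List.pyGetD plot 0 []).length
  let near := pvNear plot rows cols
  (PySem.List.pyRange 0 rows 1).foldl (fun count i =>
    (PySem.List.pyRange 0 cols 1).foldl (fun count j =>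
      if pvCell plot i j == 0 && !(PySem.Set.contains near (i, j)) then count + 1
      else count) count) 0

-- ===== PRECONDITION & SPEC =====
-- Pre_ excludes exactly the inputs where Python A raises IndexError: the empty plot
-- (len(plot[0])) and plots with a row shorter than len(plot[0]) (plot[i][j] out of range).
def Pre_cacti_number (plot : List (List Int)) : Prop :=
  plot ≠ [] ∧ ∀ row ∈ plot, (plot.headD []).length ≤ row.length
instance (plot : List (List Int)) : Decidable (Pre_cacti_number plot) := by
  unfold Pre_cacti_number; infer_instance
def pvWitness_cacti_number : List (List Int) := [[0, 1], [0, 0]]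

def Spec_cacti_number (plot : List (List Int)) (out : Int) : Prop := out = cacti_number_alt plot
instance (plot : List (List Int)) (out : Int) : Decidable (Spec_cacti_number plot out) := by
  unfold Spec_cacti_number; infer_instance

-- ===== CLAIM (what is proved, stated in full; the proofs are below) =====
def Claim_equal_cacti_number : Prop := ∀ (plot : List (List Int)), Dom_cacti_number plot → Pre_cacti_number plot → Spec_cacti_number plot (cacti_number plot)

-- ===== LEMMAS AND PROOFS =====

theorem pvNbrs_eq_flatMap (rows cols i j : Int) :
    pvNbrs rows cols i j =
      ([-1, 0, 1] : List Int).flatMap (fun di =>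
        (([-1, 0, 1] : List Int).filter (fun dj =>
          0 ≤ i + di && i + di < rows && 0 ≤ j + dj && j + dj < cols)).map
          (fun dj => (i + di, j + dj))) := by
  unfold pvNbrs
  simp only [PySem.List.foldl_append_if]
  rw [PySem.List.foldl_append_eq_flatMap]
  exact List.nil_append _

theorem mem_pvNbrs (rows cols i j : Int) (p : Int × Int) :
    p ∈ pvNbrs rows cols i j ↔
      (p.1 - i).natAbs ≤ 1 ∧ (p.2 - j).natAbs ≤ 1 ∧
      0 ≤ p.1 ∧ p.1 < rows ∧ 0 ≤ p.2 ∧ p.2 < cols := by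
  obtain ⟨a, b⟩ := p
  rw [pvNbrs_eq_flatMap]
  simp only [List.mem_flatMap, List.mem_map, List.mem_filter, List.mem_cons,
    List.not_mem_nil, or_false, Bool.and_eq_true, decide_eq_true_eq, Prod.mk.injEq]
  constructor
  · rintro ⟨di, hdi, dj, ⟨hdj, h⟩, rfl, rfl⟩
    omega
  · rintro ⟨h1, h2, h3, h4, h5, h6⟩
    exact ⟨a - i, by omega, b - j, ⟨by omega, by simp; omega⟩, by omega, by omega⟩

-- membership in a 'for …: if P: s.update(ns …)' loop
theorem mem_foldl_update {α β : Type} [BEq α] [LawfulBEq α]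
    (l : List β) (P : β → Bool) (ns : β → List α) (s : PySem.Set α) (x : α) :
    (x ∈ l.foldl (fun s y => if P y then PySem.Set.update s (ns y) else s) s) ↔
      x ∈ s ∨ ∃ y ∈ l, P y = true ∧ x ∈ ns y := by
  induction l generalizing s with
  | nil => simp
  | cons h t ih =>
    simp only [List.foldl_cons, ih]
    by_cases hp : P h = true <;> simp [hp, PySem.Set.mem_update]
    tauto

-- the same, for the nested grid loop
theorem mem_foldl_update2 {α β γ : Type} [BEq α] [LawfulBEq α]
    (l₁ : List β) (l₂ : List γ) (P : β → γ → Bool) (ns : β → γ → List α)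
    (s : PySem.Set α) (x : α) :
    (x ∈ l₁.foldl (fun s i =>
        l₂.foldl (fun s j => if P i j then PySem.Set.update s (ns i j) else s) s) s) ↔
      x ∈ s ∨ ∃ i ∈ l₁, ∃ j ∈ l₂, P i j = true ∧ x ∈ ns i j := by
  induction l₁ generalizing s with
  | nil => simp
  | cons h t ih =>
    simp only [List.foldl_cons, ih, mem_foldl_update]
    constructor
    · rintro ((hs | ⟨j, hj, hP, hx⟩) | ⟨i, hi, j, hj, hP, hx⟩)
      · exact Or.inl hs
      · exact Or.inr ⟨h, by simp, j, hj, hP, hx⟩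
      · exact Or.inr ⟨i, by simp [hi], j, hj, hP, hx⟩
    · rintro (hs | ⟨i, hi, j, hj, hP, hx⟩)
      · exact Or.inl (Or.inl hs)
      · rcases List.mem_cons.mp hi with rfl | hi
        · exact Or.inl (Or.inr ⟨j, hj, hP, hx⟩)
        · exact Or.inr ⟨i, hi, j, hj, hP, hx⟩

theorem mem_pvNear (plot : List (List Int)) (rows cols : Int) (p : Int × Int) :
    p ∈ pvNear plot rows cols ↔
      ∃ i, (0 ≤ i ∧ i < rows) ∧ ∃ j, (0 ≤ j ∧ j < cols) ∧
        pvCell plot i j = 1 ∧ p ∈ pvNbrs rows cols i j := by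
  unfold pvNear
  rw [mem_foldl_update2]
  simp [PySem.Set.empty, PySem.List.mem_pyRange_one]

-- A's elif chain is the disjunction of its eight tests
theorem pvAdjA_iff (plot : List (List Int)) (rows cols i j : Int) :
    pvAdjA plot rows cols i j = true ↔
      (0 < i ∧ pvCell plot (i-1) j = 1) ∨
      (i < rows - 1 ∧ pvCell plot (i+1) j = 1) ∨
      (0 < j ∧ pvCell plot i (j-1) = 1) ∨
      (j < cols - 1 ∧ pvCell plot i (j+1) = 1) ∨
      (0 < i ∧ 0 < j ∧ pvCell plot (i-1) (j-1) = 1) ∨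
      (0 < i ∧ j < cols - 1 ∧ pvCell plot (i-1) (j+1) = 1) ∨
      (i < rows - 1 ∧ 0 < j ∧ pvCell plot (i+1) (j-1) = 1) ∨
      (i < rows - 1 ∧ j < cols - 1 ∧ pvCell plot (i+1) (j+1) = 1) := by
  unfold pvAdjA
  split_ifs with h1 h2 h3 h4 h5 h6 h7 h8
  all_goals simp only [Bool.and_eq_true, decide_eq_true_eq, beq_iff_eq] at *
  · exact iff_of_true trivial (Or.inl h1)
  · exact iff_of_true trivial (Or.inr (Or.inl h2))
  · exact iff_of_true trivial (Or.inr (Or.inr (Or.inl h3)))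
  · exact iff_of_true trivial (Or.inr (Or.inr (Or.inr (Or.inl h4))))
  · exact iff_of_true trivial (Or.inr (Or.inr (Or.inr (Or.inr (Or.inl ⟨h5.1.1, h5.1.2, h5.2⟩)))))
  · exact iff_of_true trivial (Or.inr (Or.inr (Or.inr (Or.inr (Or.inr (Or.inl ⟨h6.1.1, h6.1.2, h6.2⟩))))))
  · exact iff_of_true trivial (Or.inr (Or.inr (Or.inr (Or.inr (Or.inr (Or.inr (Or.inl ⟨h7.1.1, h7.1.2, h7.2⟩)))))))
  · exact iff_of_true trivial (Or.inr (Or.inr (Or.inr (Or.inr (Or.inr (Or.inr (Or.inr ⟨h8.1.1, h8.1.2, h8.2⟩)))))))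
  · exact iff_of_false (fun h => h)
      (by rintro (h | h | h | h | h | h | h | h)
          · exact h1 h
          · exact h2 h
          · exact h3 h
          · exact h4 h
          · exact h5 ⟨⟨h.1, h.2.1⟩, h.2.2⟩
          · exact h6 ⟨⟨h.1, h.2.1⟩, h.2.2⟩
          · exact h7 ⟨⟨h.1, h.2.1⟩, h.2.2⟩
          · exact h8 ⟨⟨h.1, h.2.1⟩, h.2.2⟩)

theorem adjA_iff (plot : List (List Int)) (rows cols i j : Int)
    (hi : 0 ≤ i) (hi2 : i < rows) (hj : 0 ≤ j) (hj2 : j < cols)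
    (h0 : pvCell plot i j = 0) :
    (pvAdjA plot rows cols i j = true) ↔ (i, j) ∈ pvNear plot rows cols := by
  rw [pvAdjA_iff, mem_pvNear]
  constructor
  · rintro (⟨h, hc⟩ | ⟨h, hc⟩ | ⟨h, hc⟩ | ⟨h, hc⟩ |
      ⟨h, h', hc⟩ | ⟨h, h', hc⟩ | ⟨h, h', hc⟩ | ⟨h, h', hc⟩)
    · exact ⟨i-1, ⟨by omega, by omega⟩, j, ⟨hj, hj2⟩, hc, by rw [mem_pvNbrs]; simp; omega⟩
    · exact ⟨i+1, ⟨by omega, by omega⟩, j, ⟨hj, hj2⟩, hc, by rw [mem_pvNbrs]; simp; omega⟩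
    · exact ⟨i, ⟨hi, hi2⟩, j-1, ⟨by omega, by omega⟩, hc, by rw [mem_pvNbrs]; simp; omega⟩
    · exact ⟨i, ⟨hi, hi2⟩, j+1, ⟨by omega, by omega⟩, hc, by rw [mem_pvNbrs]; simp; omega⟩
    · exact ⟨i-1, ⟨by omega, by omega⟩, j-1, ⟨by omega, by omega⟩, hc,
        by rw [mem_pvNbrs]; simp; omega⟩
    · exact ⟨i-1, ⟨by omega, by omega⟩, j+1, ⟨by omega, by omega⟩, hc,
        by rw [mem_pvNbrs]; simp; omega⟩
    · exact ⟨i+1, ⟨by omega, by omega⟩, j-1, ⟨by omega, by omega⟩, hc,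
        by rw [mem_pvNbrs]; simp; omega⟩
    · exact ⟨i+1, ⟨by omega, by omega⟩, j+1, ⟨by omega, by omega⟩, hc,
        by rw [mem_pvNbrs]; simp; omega⟩
  · rintro ⟨i', ⟨hia, hib⟩, j', ⟨hja, hjb⟩, hc, hn⟩
    rw [mem_pvNbrs] at hn
    simp only at hn
    have hii : i' = i - 1 ∨ i' = i ∨ i' = i + 1 := by omega
    have hjj : j' = j - 1 ∨ j' = j ∨ j' = j + 1 := by omega
    rcases hii with rfl | rfl | rfl <;> rcases hjj with h' | h' | h' <;> subst h'
    · exact Or.inr (Or.inr (Or.inr (Or.inr (Or.inl ⟨by omega, by omega, hc⟩))))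
    · exact Or.inl ⟨by omega, hc⟩
    · exact Or.inr (Or.inr (Or.inr (Or.inr (Or.inr (Or.inl ⟨by omega, by omega, hc⟩)))))
    · exact Or.inr (Or.inr (Or.inl ⟨by omega, hc⟩))
    · rw [h0] at hc; exact absurd hc (by norm_num)
    · exact Or.inr (Or.inr (Or.inr (Or.inl ⟨by omega, hc⟩)))
    · exact Or.inr (Or.inr (Or.inr (Or.inr (Or.inr (Or.inr (Or.inl ⟨by omega, by omega, hc⟩))))))
    · exact Or.inr (Or.inl ⟨by omega, hc⟩)
    · exact Or.inr (Or.inr (Or.inr (Or.inr (Or.inr (Or.inr (Or.inr ⟨by omega, by omega, hc⟩))))))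

-- per-cell agreement of the two loop bodies
theorem body_eq (plot : List (List Int)) (rows cols i j : Int) (c : Int)
    (hi : 0 ≤ i) (hi2 : i < rows) (hj : 0 ≤ j) (hj2 : j < cols) :
    (if pvCell plot i j == 0 then
       (if !(pvAdjA plot rows cols i j) then c + 1 else c)
     else c) =
    (if pvCell plot i j == 0 && !(PySem.Set.contains (pvNear plot rows cols) (i, j)) then c + 1
     else c) := by
  by_cases h0 : pvCell plot i j = 0
  · have heq : pvAdjA plot rows cols i j = PySem.Set.contains (pvNear plot rows cols) (i, j) := by
      rw [Bool.eq_iff_iff, PySem.Set.contains_iff]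
      exact adjA_iff plot rows cols i j hi hi2 hj hj2 h0
    simp [h0, heq]
  · simp [h0]

-- ===== VERDICT (by name: the statement is the Claim_ definition above) =====
theorem cacti_number_spec : Claim_equal_cacti_number := by
  intro plot _ _
  unfold Spec_cacti_number cacti_number cacti_number_alt
  apply PySem.List.foldl_congr_mem
  intro c i hi
  apply PySem.List.foldl_congr_mem
  intro c j hj
  rw [PySem.List.mem_pyRange_one] at hi hj
  exact body_eq plot _ _ i j c hi.1 hi.2 hj.1 hj.2
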